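-- pv_equiv track=rewrite | github.com/pypi-data/pypi-mirror-22 | packages/id2xml/id2xml-0.9.0-py2.7.egg/id2xml/parser.py | split_on_large_whitespace
-- ===== SOURCE A (Python) =====
-- def split_on_large_whitespace(line):
--     """
--     Split on the largest contiguous whitespace.  If that is at the start
--     or end of the line, then check if there is large whitespace at the
--     opposite end of the line, too, and return the stripped line as centered.
--     """
--     left = center = right = ""
--     pos = 0
--     prev = 0
--     count = 0
--     bestp = 0
--     bestc = 0
--     for i, c in enumerate(line):
--         if c == ' ':
--             if prev+1 == i:
--                 count += 1
--                 prev = i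
--             else:
--
--                 pos = i
--                 prev = i
--                 count = 1
--         if count > bestc:
--             bestp = pos
--             bestc = count
--     #
--     if bestp == 0 or bestp == len(line.rstrip()):
--         rwhite = len(line)-len(line.rstrip())
--         lwhite = len(line)-len(line.lstrip())
--         if abs(rwhite-lwhite) < min(rwhite, lwhite):
--             center = line.strip()
--     if not center:
--         left, right = line[:bestp].strip(), line[bestp:].strip()
--     return left, center, right
-- ===== SOURCE B (Python) =====
-- def split_on_large_whitespace(line):
--     """
--     Split on the largest contiguous whitespace.  If that is at the start
--     or end of the line, then check if there is large whitespace at the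
--     opposite end of the line, too, and return the stripped line as centered.
--     """
--     # Probe-growing substring search: the length of the longest run of
--     # spaces is the largest k for which ' '*k is a substring of the line,
--     # and the earliest maximal run starts at the first occurrence of that
--     # probe; no per-character run bookkeeping at all.
--     bestc = 0
--     while ' ' * (bestc + 1) in line:
--         bestc += 1
--     bestp = line.index(' ' * bestc) if bestc else 0
--     left = center = right = ""
--     if bestp == 0 or bestp == len(line.rstrip()):
--         rwhite = len(line) - len(line.rstrip())
--         lwhite = len(line) - len(line.lstrip())
--         if abs(rwhite - lwhite) < min(rwhite, lwhite):
--             center = line.strip()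
--     if not center:
--         left, right = line[:bestp].strip(), line[bestp:].strip()
--     return left, center, right
-- ===== Notes on version B (the rewrite author's own statement) =====
-- stated objective: faster
-- what changed: A's per-character five-variable state machine (pos/prev/count/bestp/bestc updated on every character) is replaced by probe-growing substring search: grow a probe of bestc+1 spaces while it is still a substring of the line, then take bestp = line.index(probe) (first occurrence of the maximal probe = start of the earliest maximal run, 0 when there are no spaces); the stripping tail is unchanged.
-- intended difference: On lines whose first character is not a space, second is a space, and no other run of spaces is strictly longer than the run starting at index 1, A's stale `pos` variable books that run at index 0, so A splits at 0 and returns an empty left part with the whole stripped line as the right (or centered) part; B splits at the actual run start 1, which is the intended split on the largest whitespace - e.g. on 'a b' A returns ('', '', 'a b') while B returns ('a', '', 'b'). — e.g. on split_on_large_whitespace("a b"): A returns ("", "", "a b"), B returns ("a", "", "b")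
import Mathlib
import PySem

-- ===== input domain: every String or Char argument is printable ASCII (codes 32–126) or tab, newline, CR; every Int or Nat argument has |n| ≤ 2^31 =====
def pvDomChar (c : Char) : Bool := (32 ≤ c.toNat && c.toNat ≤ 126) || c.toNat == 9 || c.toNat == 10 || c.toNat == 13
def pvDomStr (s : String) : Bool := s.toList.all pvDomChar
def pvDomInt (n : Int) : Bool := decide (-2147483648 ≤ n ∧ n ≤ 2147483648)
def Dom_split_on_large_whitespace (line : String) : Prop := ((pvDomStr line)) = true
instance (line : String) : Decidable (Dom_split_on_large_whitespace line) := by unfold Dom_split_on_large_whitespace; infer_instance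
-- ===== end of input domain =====

-- B replaces A's per-character five-variable state machine by probe-growing substring
-- search (grow a probe of spaces while it is still a substring, then locate its first
-- occurrence); objective: faster (measured so in a timing run: bulk substring scans
-- instead of per-character work); B also fixes A's stale-pos slip for a space run
-- starting at index 1 — see D_ below.  Return value only; no mutation.

-- ===== PORT A =====
-- state = (pos, prev, count, bestp, bestc), exactly A's five locals
def pvStepA (s : Int × Int × Int × Int × Int) (ic : Int × Char) : Int × Int × Int × Int × Int :=
  let u :=
    if ic.2 = ' ' then
      if s.2.1 + 1 = ic.1 then (s.1, ic.1, s.2.2.1 + 1)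
      else (ic.1, ic.1, (1 : Int))
    else (s.1, s.2.1, s.2.2.1)
  if u.2.2 > s.2.2.2.2 then (u.1, u.2.1, u.2.2, u.1, u.2.2)
  else (u.1, u.2.1, u.2.2, s.2.2.2.1, s.2.2.2.2)

def split_on_large_whitespace (line : String) : String × String × String :=
  let cs := line.toList
  let st := (PySem.List.enumerate cs 0).foldl pvStepA (0, 0, 0, 0, 0)
  let bestp := st.2.2.2.1
  let center : List Char :=
    if bestp = 0 ∨ bestp = ((PySem.Chars.rstrip cs).length : Int) then
      let rwhite : Int := (cs.length : Int) - ((PySem.Chars.rstrip cs).length : Int)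
      let lwhite : Int := (cs.length : Int) - ((PySem.Chars.lstrip cs).length : Int)
      if |rwhite - lwhite| < min rwhite lwhite then PySem.Chars.strip cs else []
    else []
  if center = [] then
    (String.ofList (PySem.Chars.strip (PySem.List.slice cs none (some bestp))), "",
     String.ofList (PySem.Chars.strip (PySem.List.slice cs (some bestp) none)))
  else ("", String.ofList center, "")

-- ===== PORT B =====
-- B's while loop: grow the probe while ' '*(bestc+1) is a substring; each pass
-- increments bestc, and a run of spaces is at most cs.length long, so cs.length
-- units of fuel are enough for the loop to reach its exit test.
def pvGrow (fuel : Nat) (cs : List Char) (c : Nat) : Nat :=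
  match fuel with
  | 0 => c
  | f + 1 =>
    if PySem.Chars.isIn (List.replicate (c + 1) ' ') cs then pvGrow f cs (c + 1) else c

def split_on_large_whitespace_alt (line : String) : String × String × String :=
  let cs := line.toList
  let bestc := pvGrow cs.length cs 0
  -- line.index(' '*bestc): the probe passed the membership test, so it is present
  -- and index = find, exact here
  let bestp : Int := if bestc = 0 then 0 else PySem.Chars.find cs (List.replicate bestc ' ')
  let center : List Char :=
    if bestp = 0 ∨ bestp = ((PySem.Chars.rstrip cs).length : Int) then
      let rwhite : Int := (cs.length : Int) - ((PySem.Chars.rstrip cs).length : Int)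
      let lwhite : Int := (cs.length : Int) - ((PySem.Chars.lstrip cs).length : Int)
      if |rwhite - lwhite| < min rwhite lwhite then PySem.Chars.strip cs else []
    else []
  if center = [] then
    (String.ofList (PySem.Chars.strip (PySem.List.slice cs none (some bestp))), "",
     String.ofList (PySem.Chars.strip (PySem.List.slice cs (some bestp) none)))
  else ("", String.ofList center, "")

-- ===== PRECONDITION & SPEC =====
-- A is total: no Pre_.
-- On lines whose first character is not a space and whose run of spaces starting at index 1
-- is not exceeded by any other run, A's stale `pos` books that run at index 0, so A splits at
-- 0 (empty left part, whole stripped line right/centered) while B splits at the actual run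
-- start, index 1, the intended split on the largest whitespace.
def D_split_on_large_whitespace (line : String) : Prop :=
  let l := line.toList
  let k := (l.tail.takeWhile (fun d => d == ' ')).length
  1 ≤ k ∧ l.getD 0 ' ' ≠ ' ' ∧ ¬ (List.replicate (k + 1) ' ' <:+: l)
instance (line : String) : Decidable (D_split_on_large_whitespace line) := by
  unfold D_split_on_large_whitespace; infer_instance

def Spec_split_on_large_whitespace (line : String) (out : String × String × String) : Prop :=
  ¬ D_split_on_large_whitespace line → out = split_on_large_whitespace_alt line
instance (line : String) (out : String × String × String) : Decidable (Spec_split_on_large_whitespace line out) := by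
  unfold Spec_split_on_large_whitespace; infer_instance

def pvDiffWitness_split_on_large_whitespace : String := "a  b"
def pvDiffWitnessOut_split_on_large_whitespace : (String × String × String) × (String × String × String) :=
  (("", "", "a  b"), ("a", "", "b"))

-- ===== CLAIM (what is proved, stated in full; the proofs are below) =====
def Claim_unchanged_split_on_large_whitespace : Prop := ∀ (line : String), Dom_split_on_large_whitespace line → Spec_split_on_large_whitespace line (split_on_large_whitespace line)
def Claim_changed_split_on_large_whitespace : Prop := Dom_split_on_large_whitespace (pvDiffWitness_split_on_large_whitespace) ∧ D_split_on_large_whitespace (pvDiffWitness_split_on_large_whitespace) ∧ split_on_large_whitespace (pvDiffWitness_split_on_large_whitespace) = pvDiffWitnessOut_split_on_large_whitespace.1 ∧ split_on_large_whitespace_alt (pvDiffWitness_split_on_large_whitespace) = pvDiffWitnessOut_split_on_large_whitespace.2 ∧ pvDiffWitnessOut_split_on_large_whitespace.1 ≠ pvDiffWitnessOut_split_on_large_whitespace.2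

-- ===== LEMMAS AND PROOFS =====

-- A's step on a non-space character leaves the state unchanged (when count ≤ bestc).
theorem pvStepA_nonspace (s : Int × Int × Int × Int × Int) (i : Int) (c : Char) (hc : ¬ c = ' ')
    (hcount : s.2.2.1 ≤ s.2.2.2.2) : pvStepA s (i, c) = s := by
  obtain ⟨pos, prev, count, bestp, bestc⟩ := s
  simp only [pvStepA, hc, if_false] at *
  rw [if_neg (by omega)]

-- A over a run of spaces continuing from prev = i-1 (the continuation branch each step).
theorem pvA_run_cont (k : Nat) : ∀ (i pos count bestp bestc : Int), count ≤ bestc →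
    (PySem.List.enumerate (List.replicate k ' ') i).foldl pvStepA (pos, i - 1, count, bestp, bestc)
    = (pos, i - 1 + k, count + k, if bestc < count + k then pos else bestp, max bestc (count + k)) := by
  induction k with
  | zero =>
    intro i pos count bestp bestc hcount
    simp only [List.replicate, PySem.List.enumerate_nil, List.foldl_nil, Nat.cast_zero, add_zero]
    rw [if_neg (by omega), max_eq_left hcount]
  | succ k ih =>
    intro i pos count bestp bestc hcount
    rw [List.replicate_succ, PySem.List.enumerate_cons, List.foldl_cons]
    have hstep : pvStepA (pos, i - 1, count, bestp, bestc) (i, ' ')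
        = (pos, i, count + 1, if bestc < count + 1 then pos else bestp, max bestc (count + 1)) := by
      simp only [pvStepA, if_true]
      rw [if_pos (show i - 1 + 1 = i by ring)]
      dsimp only
      by_cases h : (count + 1 : Int) > bestc
      · rw [if_pos h]
        rw [Prod.mk.injEq, Prod.mk.injEq, Prod.mk.injEq, Prod.mk.injEq]
        exact ⟨rfl, rfl, rfl, by rw [if_pos h], by omega⟩
      · rw [if_neg h]
        rw [Prod.mk.injEq, Prod.mk.injEq, Prod.mk.injEq, Prod.mk.injEq]
        exact ⟨rfl, rfl, rfl, by rw [if_neg (by omega : ¬ bestc < count + 1)], by omega⟩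
    rw [hstep]
    by_cases h : bestc < count + 1
    · rw [if_pos h, max_eq_right (by omega : bestc ≤ count + 1)]
      have := ih (i + 1) pos (count + 1) pos (count + 1) (le_refl _)
      rw [show i + 1 - 1 = i by ring] at this
      rw [this]
      rw [Prod.mk.injEq, Prod.mk.injEq, Prod.mk.injEq, Prod.mk.injEq]
      refine ⟨rfl, by push_cast; ring, by push_cast; ring, ?_, by push_cast; omega⟩
      rw [if_pos (by push_cast; omega : bestc < count + ((k + 1 : Nat) : Int))]
      split <;> rfl
    · rw [if_neg h, max_eq_left (by omega : count + 1 ≤ bestc)]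
      have := ih (i + 1) pos (count + 1) bestp bestc (by omega)
      rw [show i + 1 - 1 = i by ring] at this
      rw [this]
      rw [Prod.mk.injEq, Prod.mk.injEq, Prod.mk.injEq, Prod.mk.injEq]
      refine ⟨rfl, by push_cast; ring, by push_cast; ring, ?_, by push_cast; omega⟩
      by_cases h4 : bestc < count + 1 + (k : Int)
      · rw [if_pos h4, if_pos (by push_cast; omega)]
      · rw [if_neg h4, if_neg (by push_cast; omega)]

-- A over a fresh maximal run of k ≥ 1 spaces starting at i (prev+1 ≠ i).
theorem pvA_run_fresh (k : Nat) (hk : 1 ≤ k) (i pos prev count bestp bestc : Int)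
    (hfresh : ¬ prev + 1 = i) :
    (PySem.List.enumerate (List.replicate k ' ') i).foldl pvStepA (pos, prev, count, bestp, bestc)
    = (i, i + k - 1, (k : Int), if bestc < k then i else bestp, max bestc k) := by
  obtain ⟨k, rfl⟩ : ∃ k', k = k' + 1 := ⟨k - 1, by omega⟩
  rw [List.replicate_succ, PySem.List.enumerate_cons, List.foldl_cons]
  have hstep : pvStepA (pos, prev, count, bestp, bestc) (i, ' ')
      = (i, i, 1, if bestc < 1 then i else bestp, max bestc 1) := by
    simp only [pvStepA, if_true]
    rw [if_neg hfresh]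
    dsimp only
    by_cases h : (1 : Int) > bestc
    · rw [if_pos h]
      rw [Prod.mk.injEq, Prod.mk.injEq, Prod.mk.injEq, Prod.mk.injEq]
      exact ⟨rfl, rfl, rfl, by rw [if_pos h], by omega⟩
    · rw [if_neg h]
      rw [Prod.mk.injEq, Prod.mk.injEq, Prod.mk.injEq, Prod.mk.injEq]
      exact ⟨rfl, rfl, rfl, by rw [if_neg (by omega : ¬ bestc < 1)], by omega⟩
  rw [hstep]
  have hmx : (1 : Int) ≤ max bestc 1 := by omega
  have := pvA_run_cont k (i + 1) i 1 (if bestc < 1 then i else bestp) (max bestc 1) hmx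
  rw [show i + 1 - 1 = i by ring] at this
  rw [this]
  rw [Prod.mk.injEq, Prod.mk.injEq, Prod.mk.injEq, Prod.mk.injEq]
  refine ⟨rfl, by push_cast; ring, by push_cast; ring, ?_, by push_cast; omega⟩
  by_cases hb : bestc < 1
  · rw [if_pos hb, if_pos (by push_cast; omega : bestc < ((k + 1 : Nat) : Int))]
    split <;> rfl
  · rw [if_neg hb, max_eq_left (by omega : (1 : Int) ≤ bestc)]
    by_cases h2 : bestc < 1 + (k : Int)
    · rw [if_pos h2, if_pos (by push_cast; omega)]
    · rw [if_neg h2, if_neg (by push_cast; omega)]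

theorem pvRep_prefix (m k : Nat) (rest : List Char) (hrest : ¬ rest.head? = some ' ')
    (h : List.replicate m ' ' <+: List.replicate k ' ' ++ rest) : m ≤ k := by
  induction m generalizing k rest with
  | zero => omega
  | succ m ih =>
    cases k with
    | zero =>
      simp only [List.replicate, List.nil_append] at h
      cases rest with
      | nil => simp at h
      | cons c t =>
        rw [List.cons_prefix_cons] at h
        simp [← h.1] at hrest
    | succ k =>
      rw [List.replicate_succ, List.replicate_succ, List.cons_append, List.cons_prefix_cons] at h
      exact Nat.succ_le_succ (ih k rest hrest h.2)

theorem pvRep_infix (m k : Nat) (rest : List Char) (hrest : ¬ rest.head? = some ' ')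
    (h : List.replicate m ' ' <:+: List.replicate k ' ' ++ rest) :
    m ≤ k ∨ List.replicate m ' ' <:+: rest := by
  induction k with
  | zero =>
    right
    simpa using h
  | succ k ih =>
    rw [List.replicate_succ, List.cons_append, List.infix_cons_iff] at h
    rcases h with h | h
    · rw [← List.cons_append, ← List.replicate_succ] at h
      exact Or.inl (pvRep_prefix m (k + 1) rest hrest h)
    · rcases ih h with h' | h'
      · exact Or.inl (by omega)
      · exact Or.inr h'

-- the character after the spaces collected by takeWhile is not a space
theorem pvDropWhile_head (l : List Char) :
    ¬ (l.dropWhile (fun d => d == ' ')).head? = some ' ' := by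
  induction l with
  | nil => simp
  | cons c t ih =>
    rw [List.dropWhile_cons]
    by_cases hc : c = ' '
    · rw [if_pos (by simp [hc])]
      exact ih
    · rw [if_neg (by simp [hc])]
      simp [hc]

-- a list is its leading spaces followed by the rest
theorem pvDecomp (l : List Char) :
    l = List.replicate (l.takeWhile (fun d => d == ' ')).length ' '
        ++ l.dropWhile (fun d => d == ' ') := by
  conv_lhs => rw [← List.takeWhile_append_dropWhile (p := fun d => d == ' ') (l := l)]
  congr 1
  rw [List.eq_replicate_iff]
  exact ⟨rfl, fun b hb => by simpa using List.mem_takeWhile_imp hb⟩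

-- shorter space probes are substrings of longer ones
theorem pvMono (m k : Nat) (l : List Char) (hmk : m ≤ k)
    (h : List.replicate k ' ' <:+: l) : List.replicate m ' ' <:+: l := by
  have hpre : List.replicate m ' ' <+: List.replicate k ' ' := by
    refine ⟨List.replicate (k - m) ' ', ?_⟩
    rw [List.replicate_append_replicate]
    congr 1
    omega
  exact hpre.isInfix.trans h

-- find = j when the pattern occurs at j and nowhere earlier
theorem pvFindEq (l sub : List Char) (j : Nat) (h1 : sub <+: l.drop j)
    (h2 : ∀ i < j, ¬ sub <+: l.drop i) : PySem.Chars.find l sub = (j : Int) := by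
  have hinf : sub <:+: l := h1.isInfix.trans (List.drop_suffix j l).isInfix
  have hnn : (0 : Int) ≤ PySem.Chars.find l sub := (PySem.Chars.find_nonneg_iff l sub).2 hinf
  obtain ⟨hs1, hs2⟩ := PySem.Chars.find_spec hnn
  rcases Nat.lt_trichotomy (PySem.Chars.find l sub).toNat j with h | h | h
  · exact absurd hs1 (h2 _ h)
  · omega
  · exact absurd h1 (hs2 j h)

-- stepping off a non-space head shifts find by one
theorem pvFindCons (c : Char) (t : List Char) (k : Nat) (hc : ¬ c = ' ') (hk : 1 ≤ k)
    (h : List.replicate k ' ' <:+: t) :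
    PySem.Chars.find (c :: t) (List.replicate k ' ')
      = 1 + PySem.Chars.find t (List.replicate k ' ') := by
  have hnn : (0 : Int) ≤ PySem.Chars.find t (List.replicate k ' ') :=
    (PySem.Chars.find_nonneg_iff t _).2 h
  obtain ⟨hs1, hs2⟩ := PySem.Chars.find_spec hnn
  have := pvFindEq (c :: t) (List.replicate k ' ') ((PySem.Chars.find t (List.replicate k ' ')).toNat + 1)
    (by simpa using hs1)
    (by
      intro i hi
      cases i with
      | zero =>
        intro hpre
        obtain ⟨k', rfl⟩ : ∃ k', k = k' + 1 := ⟨k - 1, by omega⟩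
        rw [List.replicate_succ, List.drop_zero, List.cons_prefix_cons] at hpre
        exact hc hpre.1.symm
      | succ i => simpa using hs2 i (by omega))
  rw [this]
  push_cast
  omega

-- stepping over a too-short run of a spaces shifts find by a
theorem pvFindShift (a k : Nat) (r : List Char) (hr : ¬ r.head? = some ' ') (ha : a < k)
    (h : List.replicate k ' ' <:+: r) :
    PySem.Chars.find (List.replicate a ' ' ++ r) (List.replicate k ' ')
      = (a : Int) + PySem.Chars.find r (List.replicate k ' ') := by
  have hnn : (0 : Int) ≤ PySem.Chars.find r (List.replicate k ' ') :=
    (PySem.Chars.find_nonneg_iff r _).2 h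
  obtain ⟨hs1, hs2⟩ := PySem.Chars.find_spec hnn
  have hda : ∀ i : Nat, (List.replicate a ' ' ++ r).drop (a + i) = r.drop i := by
    intro i
    have h1 : (List.replicate a ' ' ++ r).drop ((List.replicate a ' ').length + i) = r.drop i :=
      List.drop_length_add_append i
    simpa using h1
  have hdw : ∀ i ≤ a, (List.replicate a ' ' ++ r).drop i = List.replicate (a - i) ' ' ++ r := by
    intro i hi
    rw [show List.replicate a ' ' = List.replicate i ' ' ++ List.replicate (a - i) ' ' from by
      rw [List.replicate_append_replicate]; congr 1; omega]
    rw [List.append_assoc, List.drop_left' (by simp)]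
  have := pvFindEq (List.replicate a ' ' ++ r) (List.replicate k ' ')
    (a + (PySem.Chars.find r (List.replicate k ' ')).toNat)
    (by rw [hda]; exact hs1)
    (by
      intro i hi
      by_cases hia : i < a
      · rw [hdw i (le_of_lt hia)]
        intro hpre
        have := pvRep_prefix k (a - i) r hr hpre
        omega
      · rw [show i = a + (i - a) by omega, hda (i - a)]
        exact hs2 (i - a) (by omega))
  rw [this]
  push_cast
  omega

-- the grown probe is the longest: its length is a substring, one more is not
theorem pvGrowSpec (l : List Char) : ∀ (fuel c : Nat),
    List.replicate c ' ' <:+: l → l.length ≤ fuel + c →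
    List.replicate (pvGrow fuel l c) ' ' <:+: l
      ∧ ¬ List.replicate (pvGrow fuel l c + 1) ' ' <:+: l := by
  intro fuel
  induction fuel with
  | zero =>
    intro c hc hlen
    simp only [pvGrow]
    refine ⟨hc, fun h => ?_⟩
    have := h.length_le
    simp only [List.length_replicate] at this
    omega
  | succ f ih =>
    intro c hc hlen
    simp only [pvGrow]
    by_cases hin : PySem.Chars.isIn (List.replicate (c + 1) ' ') l = true
    · rw [if_pos hin]
      exact ih (c + 1) ((PySem.Chars.isIn_iff_infix _ _).1 hin) (by omega)
    · rw [if_neg hin]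
      exact ⟨hc, fun h => hin ((PySem.Chars.isIn_iff_infix _ _).2 h)⟩

-- the maximal run length is unique
theorem pvBestcEq (g k : Nat) (l : List Char)
    (hg1 : List.replicate g ' ' <:+: l) (hg2 : ¬ List.replicate (g + 1) ' ' <:+: l)
    (hk1 : List.replicate k ' ' <:+: l) (hk2 : ¬ List.replicate (k + 1) ' ' <:+: l) :
    g = k := by
  rcases Nat.lt_trichotomy g k with h | h | h
  · exact absurd (pvMono (g + 1) k l (by omega) hk1) hg2
  · exact h
  · exact absurd (pvMono (k + 1) g l (by omega) hg1) hk2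

-- MAIN LEMMA for A: from a clean state, A's fold either keeps the incoming best (and no
-- later run beats it) or ends at (i + find, k) for the unique maximal k.
theorem pvMainA (fuel : Nat) : ∀ (l : List Char), l.length ≤ fuel →
    ∀ (i pos prev count bestp bc : Int),
    (l.head? = some ' ' → ¬ prev + 1 = i) → prev + 1 ≤ i → 0 ≤ bc → count ≤ bc →
    (((PySem.List.enumerate l i).foldl pvStepA (pos, prev, count, bestp, bc)).2.2.2 = (bestp, bc)
       ∧ ∀ m : Nat, bc < m → ¬ (List.replicate m ' ' <:+: l))
    ∨ (∃ k : Nat, bc < (k : Int)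
       ∧ ((PySem.List.enumerate l i).foldl pvStepA (pos, prev, count, bestp, bc)).2.2.2
          = (i + PySem.Chars.find l (List.replicate k ' '), (k : Int))
       ∧ List.replicate k ' ' <:+: l ∧ ¬ (List.replicate (k + 1) ' ' <:+: l)) := by
  induction fuel with
  | zero =>
    intro l hl i pos prev count bestp bc hinv hle hbc0 hcount
    obtain rfl : l = [] := List.eq_nil_of_length_eq_zero (by omega)
    left
    refine ⟨rfl, fun m hm hinf => ?_⟩
    rw [List.infix_nil, List.replicate_eq_nil_iff] at hinf
    omega
  | succ fuel ih =>
    intro l hl i pos prev count bestp bc hinv hle hbc0 hcount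
    cases l with
    | nil =>
      left
      refine ⟨rfl, fun m hm hinf => ?_⟩
      rw [List.infix_nil, List.replicate_eq_nil_iff] at hinf
      omega
    | cons c rest =>
      by_cases hc : c = ' '
      · subst hc
        have hrep := pvDecomp (' ' :: rest)
        set k := ((' ' :: rest).takeWhile (fun d => d == ' ')).length with hkdef
        set r' := (' ' :: rest).dropWhile (fun d => d == ' ') with hr'def
        have hr' : ¬ r'.head? = some ' ' := pvDropWhile_head _
        have hk1 : 1 ≤ k := by
          rw [hkdef, List.takeWhile_cons, if_pos (by simp)]
          simp
        have hlen : k + r'.length = rest.length + 1 := by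
          have h := congrArg List.length hrep
          simp [List.length_replicate] at h
          omega
        have hlenr : r'.length ≤ fuel := by
          simp at hl
          omega
        rw [hrep, PySem.List.enumerate_append, List.foldl_append, List.length_replicate,
          pvA_run_fresh k hk1 i pos prev count bestp bc (hinv rfl)]
        by_cases hbk : bc < (k : Int)
        · rw [if_pos hbk, max_eq_right (le_of_lt hbk)]
          rcases ih r' hlenr (i + k) i (i + k - 1) k i k
              (fun hh => absurd hh hr') (by omega) (by positivity) (le_refl _) with ⟨hA, hnone⟩ | ⟨k2, hk2, hA, hinf2, hninf2⟩
          · right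
            refine ⟨k, hbk, ?_, List.prefix_append _ _ |>.isInfix, ?_⟩
            · rw [hA, pvFindEq (List.replicate k ' ' ++ r') (List.replicate k ' ') 0
                (by simp) (by omega)]
              simp
            · intro h
              rcases pvRep_infix (k + 1) k r' hr' h with h' | h'
              · omega
              · exact hnone (k + 1) (by push_cast; omega) h'
          · right
            have hkk2 : k < k2 := by exact_mod_cast hk2
            refine ⟨k2, by omega, ?_, hinf2.trans (List.suffix_append _ _).isInfix, ?_⟩
            · rw [hA, pvFindShift k k2 r' hr' hkk2 hinf2]
              rw [Prod.mk.injEq]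
              exact ⟨by ring, rfl⟩
            · intro h
              rcases pvRep_infix (k2 + 1) k r' hr' h with h' | h'
              · omega
              · exact hninf2 h'
        · rw [if_neg hbk, max_eq_left (by omega)]
          rcases ih r' hlenr (i + k) i (i + k - 1) k bestp bc
              (fun hh => absurd hh hr') (by omega) hbc0 (by omega) with ⟨hA, hnone⟩ | ⟨k2, hk2, hA, hinf2, hninf2⟩
          · left
            refine ⟨hA, fun m hm h => ?_⟩
            rcases pvRep_infix m k r' hr' h with h' | h'
            · have : (m : Int) ≤ (k : Int) := by exact_mod_cast h'
              omega
            · exact hnone m hm h'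
          · right
            have hkk2 : k < k2 := by
              have : bc < (k2 : Int) := hk2
              have : (k : Int) ≤ bc := by omega
              exact_mod_cast (by omega : (k : Int) < (k2 : Int))
            refine ⟨k2, hk2, ?_, hinf2.trans (List.suffix_append _ _).isInfix, ?_⟩
            · rw [hA, pvFindShift k k2 r' hr' hkk2 hinf2]
              rw [Prod.mk.injEq]
              exact ⟨by ring, rfl⟩
            · intro h
              rcases pvRep_infix (k2 + 1) k r' hr' h with h' | h'
              · omega
              · exact hninf2 h'
      · rw [PySem.List.enumerate_cons, List.foldl_cons,
          pvStepA_nonspace (pos, prev, count, bestp, bc) i c hc hcount]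
        rcases ih rest (by simp at hl; omega) (i + 1) pos prev count bestp bc
            (fun _ => by omega) (by omega) hbc0 hcount with ⟨hA, hnone⟩ | ⟨k2, hk2, hA, hinf2, hninf2⟩
        · left
          refine ⟨hA, fun m hm h => ?_⟩
          rw [List.infix_cons_iff] at h
          rcases h with hpre | h
          · obtain ⟨m', rfl⟩ : ∃ m', m = m' + 1 := ⟨m - 1, by omega⟩
            rw [List.replicate_succ, List.cons_prefix_cons] at hpre
            exact hc hpre.1.symm
          · exact hnone m hm h
        · right
          have hk21 : 1 ≤ k2 := by
            by_contra h
            have : k2 = 0 := by omega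
            omega
          refine ⟨k2, hk2, ?_, List.infix_cons hinf2, ?_⟩
          · rw [hA, pvFindCons c rest k2 hc hk21 hinf2]
            rw [Prod.mk.injEq]
            exact ⟨by ring, rfl⟩
          · intro h
            rw [List.infix_cons_iff] at h
            rcases h with hpre | h
            · rw [List.replicate_succ, List.cons_prefix_cons] at hpre
              exact hc hpre.1.symm
            · exact hninf2 h

-- identical tails: equal bestp gives equal outputs (stated via the two ports)
theorem pvTail_congr (line : String)
    (h : (((PySem.List.enumerate line.toList 0).foldl pvStepA (0, 0, 0, 0, 0)).2.2.2.1 : Int)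
         = (if pvGrow line.toList.length line.toList 0 = 0 then (0 : Int)
            else PySem.Chars.find line.toList (List.replicate (pvGrow line.toList.length line.toList 0) ' '))) :
    split_on_large_whitespace line = split_on_large_whitespace_alt line := by
  simp only [split_on_large_whitespace, split_on_large_whitespace_alt]
  rw [h]

-- B's best pair from the unique maximal k
theorem pvB_best (l : List Char) (k : Nat) (hk : 1 ≤ k)
    (hinf : List.replicate k ' ' <:+: l) (hninf : ¬ List.replicate (k + 1) ' ' <:+: l) :
    (if pvGrow l.length l 0 = 0 then (0 : Int)
      else PySem.Chars.find l (List.replicate (pvGrow l.length l 0) ' '))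
    = PySem.Chars.find l (List.replicate k ' ') := by
  obtain ⟨hg1, hg2⟩ := pvGrowSpec l l.length 0 (by simp) (by omega)
  have hgk : pvGrow l.length l 0 = k := pvBestcEq _ k l hg1 hg2 hinf hninf
  rw [hgk, if_neg (by omega)]

-- B's best pair when there are no spaces at all
theorem pvB_best_zero (l : List Char) (hnone : ∀ m : Nat, 0 < m → ¬ List.replicate m ' ' <:+: l) :
    (if pvGrow l.length l 0 = 0 then (0 : Int)
      else PySem.Chars.find l (List.replicate (pvGrow l.length l 0) ' ')) = 0 := by
  obtain ⟨hg1, hg2⟩ := pvGrowSpec l l.length 0 (by simp) (by omega)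
  have : pvGrow l.length l 0 = 0 := by
    by_contra h
    exact hnone _ (by omega) hg1
  rw [this, if_pos rfl]

theorem pvNInfix_cons (c : Char) (t : List Char) (m : Nat) (hc : ¬ c = ' ') (hm : 1 ≤ m)
    (h : ¬ List.replicate m ' ' <:+: t) : ¬ List.replicate m ' ' <:+: (c :: t) := by
  intro hx
  rw [List.infix_cons_iff] at hx
  rcases hx with hpre | hx
  · obtain ⟨m', rfl⟩ : ∃ m', m = m' + 1 := ⟨m - 1, by omega⟩
    rw [List.replicate_succ, List.cons_prefix_cons] at hpre
    exact hc hpre.1.symm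
  · exact h hx

-- a probe longer than the leading run cannot occur when it does not occur in the tail
theorem pvNInfix_app (k m : Nat) (r : List Char) (hr : ¬ r.head? = some ' ') (hkm : k < m)
    (h : ¬ List.replicate m ' ' <:+: r) : ¬ List.replicate m ' ' <:+: (List.replicate k ' ' ++ r) := by
  intro hx
  rcases pvRep_infix m k r hr hx with h' | h'
  · omega
  · exact h h'

-- the maximal probe at the very start is found at 0
theorem pvFind_zero (k : Nat) (r : List Char) :
    PySem.Chars.find (List.replicate k ' ' ++ r) (List.replicate k ' ') = 0 := by
  have := pvFindEq (List.replicate k ' ' ++ r) (List.replicate k ' ') 0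
    (by simp) (by omega)
  simpa using this

theorem pv_unchanged (line : String) (hD : ¬ D_split_on_large_whitespace line) :
    split_on_large_whitespace line = split_on_large_whitespace_alt line := by
  rcases hl : line.toList with - | ⟨c, rest⟩
  · apply pvTail_congr
    rw [hl]
    simp [PySem.List.enumerate_nil, pvGrow]
  · by_cases hc : c = ' '
    · -- a leading run: both record the maximal run correctly
      apply pvTail_congr
      rw [hl]
      subst hc
      have hrep := pvDecomp (' ' :: rest)
      set k := ((' ' :: rest).takeWhile (fun d => d == ' ')).length with hkdef
      set r' := (' ' :: rest).dropWhile (fun d => d == ' ') with hr'def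
      have hr' : ¬ r'.head? = some ' ' := pvDropWhile_head _
      have hk1 : 1 ≤ k := by
        rw [hkdef, List.takeWhile_cons, if_pos (by simp)]
        simp
      have h0k : (0 : Int) < (k : Int) := by exact_mod_cast hk1
      rw [hrep, PySem.List.enumerate_append, List.foldl_append, List.length_replicate,
        pvA_run_fresh k hk1 0 0 0 0 0 0 (by omega), if_pos h0k,
        max_eq_right (le_of_lt h0k)]
      rcases pvMainA r'.length r' (le_refl _) ((0 : Int) + k) 0 (0 + (k : Int) - 1) k 0 k
          (fun hh => absurd hh hr') (by omega) (by positivity) (le_refl _) with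
          ⟨hA2, hnone⟩ | ⟨k2, hk2, hA2, hinf2, hninf2⟩
      · rw [hA2]
        rw [pvB_best (List.replicate k ' ' ++ r') k hk1 (List.prefix_append _ _).isInfix
          (pvNInfix_app k (k + 1) r' hr' (by omega)
            (hnone (k + 1) (by push_cast; omega))), pvFind_zero]
      · have hkk2 : k < k2 := by exact_mod_cast hk2
        rw [hA2]
        rw [pvB_best (List.replicate k ' ' ++ r') k2 (by omega)
          (hinf2.trans (List.suffix_append _ _).isInfix)
          (pvNInfix_app k (k2 + 1) r' hr' (by omega) hninf2),
          pvFindShift k k2 r' hr' hkk2 hinf2]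
        push_cast
        ring
    · by_cases hr : rest.head? = some ' '
      · -- the run starts at index 1: A books it at 0 (stale pos), B at its true start 1
        obtain ⟨t, rfl⟩ : ∃ t, rest = ' ' :: t := by
          cases rest with
          | nil => simp at hr
          | cons d t =>
            simp only [List.head?_cons, Option.some.injEq] at hr
            exact ⟨t, by rw [hr]⟩
        have hrep := pvDecomp (' ' :: t)
        set k := ((' ' :: t).takeWhile (fun d => d == ' ')).length with hkdef
        set r' := (' ' :: t).dropWhile (fun d => d == ' ') with hr'def
        have hr' : ¬ r'.head? = some ' ' := pvDropWhile_head _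
        have hk1 : 1 ≤ k := by
          rw [hkdef, List.takeWhile_cons, if_pos (by simp)]
          simp
        have h0k : (0 : Int) < (k : Int) := by exact_mod_cast hk1
        -- A's loop up to the end of the run: continuation branch keeps pos = 0
        have hcont := pvA_run_cont k 1 0 0 0 0 (le_refl (0 : Int))
        rw [show (1 : Int) - 1 = 0 by ring, show (0 : Int) + (k : Int) = (k : Int) by ring] at hcont
        rw [if_pos h0k, max_eq_right (le_of_lt h0k)] at hcont
        have hA0 : (PySem.List.enumerate (c :: ' ' :: t) 0).foldl pvStepA (0, 0, 0, 0, 0)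
            = (PySem.List.enumerate r' (1 + k)).foldl pvStepA (0, (k : Int), (k : Int), 0, (k : Int)) := by
          rw [PySem.List.enumerate_cons, List.foldl_cons,
            pvStepA_nonspace (0, 0, 0, 0, 0) 0 c hc (le_refl _),
            show (0 : Int) + 1 = 1 by ring, hrep,
            PySem.List.enumerate_append, List.foldl_append, List.length_replicate, hcont]
        rcases pvMainA r'.length r' (le_refl _) (1 + (k : Int)) 0 (k : Int) (k : Int) 0 (k : Int)
            (fun hh => absurd hh hr') (by omega) (by positivity) (le_refl _) with
            ⟨hA2, hnone⟩ | ⟨k2, hk2, hA2, hinf2, hninf2⟩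
        · -- A would end with bestp = 0 (the stale-pos slip): exactly the D_ region
          exfalso
          apply hD
          unfold D_split_on_large_whitespace
          have hd4 : ¬ (List.replicate (k + 1) ' ' <:+: (c :: ' ' :: t)) := by
            rw [hrep]
            exact pvNInfix_cons c _ (k + 1) hc (by omega)
              (pvNInfix_app k (k + 1) r' hr' (by omega) (hnone (k + 1) (by push_cast; omega)))
          exact ⟨by rw [hl]; exact hk1, by rw [hl]; simpa using hc, by rw [hl]; exact hd4⟩
        · -- a strictly longer run later: both record it at its true start
          apply pvTail_congr
          rw [hl, hA0, hA2]
          have hkk2 : k < k2 := by exact_mod_cast hk2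
          have hinft : List.replicate k2 ' ' <:+: (' ' :: t) := by
            rw [hrep]
            exact hinf2.trans (List.suffix_append _ _).isInfix
          rw [pvB_best (c :: ' ' :: t) k2 (by omega) (List.infix_cons hinft)
            (pvNInfix_cons c _ (k2 + 1) hc (by omega)
              (by rw [hrep]; exact pvNInfix_app k (k2 + 1) r' hr' (by omega) hninf2)),
            pvFindCons c (' ' :: t) k2 hc (by omega) hinft,
            show (' ' :: t) = List.replicate k ' ' ++ r' from hrep,
            pvFindShift k k2 r' hr' hkk2 hinf2]
          push_cast
          ring
      · -- no space at index 1: clean from the second character on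
        apply pvTail_congr
        rw [hl]
        rw [PySem.List.enumerate_cons, List.foldl_cons,
          pvStepA_nonspace (0, 0, 0, 0, 0) 0 c hc (le_refl _)]
        rcases pvMainA rest.length rest (le_refl _) ((0 : Int) + 1) 0 0 0 0 0
            (fun hh => absurd hh hr) (by omega) (le_refl _) (le_refl _) with
            ⟨hA2, hnone⟩ | ⟨k2, hk2, hA2, hinf2, hninf2⟩
        · rw [hA2]
          rw [pvB_best_zero (c :: rest) (fun m hm h => by
            rcases Nat.lt_or_ge 0 m with - | h0
            · exact pvNInfix_cons c rest m hc (by omega) (hnone m (by omega)) h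
            · omega)]
        · have hk21 : 1 ≤ k2 := by
            by_contra hx
            have : k2 = 0 := by omega
            omega
          rw [hA2]
          rw [pvB_best (c :: rest) k2 hk21 (List.infix_cons hinf2)
            (pvNInfix_cons c rest (k2 + 1) hc (by omega) hninf2),
            pvFindCons c rest k2 hc hk21 hinf2]
          push_cast
          ring

-- ===== VERDICT (by name: the statement is the Claim_ definition above) =====
theorem split_on_large_whitespace_spec : Claim_unchanged_split_on_large_whitespace := by
  intro line _ hD
  exact pv_unchanged line hD

theorem split_on_large_whitespace_changed : Claim_changed_split_on_large_whitespace := by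
  unfold Claim_changed_split_on_large_whitespace; decide
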